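-- pv_equiv track=rewrite | github.com/weholt/dot.work | src/dot_work/subagents/generator.py | generate_canonical_template
-- ===== SOURCE A (Python) =====
-- def generate_canonical_template(
--
--     name: str,
--     description: str,
--     environments: list[str] | None = None,
-- ) -> str:
--     """Generate a canonical subagent template file.
--
--     Args:
--         name: Subagent name.
--         description: Subagent description.
--         environments: List of environments to include in template.
--
--     Returns:
--         Canonical subagent template content.
--     """
--     if environments is None:
--         environments = ["claude", "opencode", "copilot"]
--
--     lines = ["---"]
--     lines.append("meta:")
--     lines.append(f"  name: {name}")
--     lines.append(f"  description: {description}")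
--     lines.append("")
--     lines.append("environments:")
--
--     for env in environments:
--         if env == "claude":
--             lines.append("  claude:")
--             lines.append('    target: ".claude/agents/"')
--             lines.append("    model: sonnet")
--             lines.append("    permissionMode: default")
--         elif env == "opencode":
--             lines.append("  opencode:")
--             lines.append('    target: ".opencode/agent/"')
--             lines.append("    mode: subagent")
--             lines.append("    temperature: 0.1")
--         elif env == "copilot":
--             lines.append("  copilot:")
--             lines.append('    target: ".github/agents/"')
--             lines.append("    infer: true")
--             lines.append("    tools:")
--             lines.append("      - read")
--             lines.append("      - edit")
--             lines.append("      - search")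
--
--     lines.append("")
--     lines.append("# Common configuration (can be overridden per-environment)")
--     lines.append("tools:")
--     lines.append("  - Read")
--     lines.append("  - Write")
--     lines.append("  - Edit")
--     lines.append("  - Bash")
--     lines.append("  - Grep")
--     lines.append("---")
--     lines.append("")
--     lines.append(f"# {name}")
--     lines.append("")
--     lines.append(description)
--     lines.append("")
--     lines.append("## Instructions")
--     lines.append("")
--     lines.append("Add your subagent instructions here...")
--
--     return "\n".join(lines)
-- ===== SOURCE B (Python) =====
-- _ENV_BLOCKS = {
--     "claude": (
--         "\n  claude:"
--         '\n    target: ".claude/agents/"'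
--         "\n    model: sonnet"
--         "\n    permissionMode: default"
--     ),
--     "opencode": (
--         "\n  opencode:"
--         '\n    target: ".opencode/agent/"'
--         "\n    mode: subagent"
--         "\n    temperature: 0.1"
--     ),
--     "copilot": (
--         "\n  copilot:"
--         '\n    target: ".github/agents/"'
--         "\n    infer: true"
--         "\n    tools:"
--         "\n      - read"
--         "\n      - edit"
--         "\n      - search"
--     ),
-- }
--
--
-- def generate_canonical_template(name, description, environments=None):
--     if environments is None:
--         environments = ["claude", "opencode", "copilot"]
--     body = "".join(_ENV_BLOCKS.get(env, "") for env in environments)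
--     return (
--         "---\n"
--         "meta:\n"
--         f"  name: {name}\n"
--         f"  description: {description}\n"
--         "\n"
--         "environments:"
--         f"{body}\n"
--         "\n"
--         "# Common configuration (can be overridden per-environment)\n"
--         "tools:\n"
--         "  - Read\n"
--         "  - Write\n"
--         "  - Edit\n"
--         "  - Bash\n"
--         "  - Grep\n"
--         "---\n"
--         "\n"
--         f"# {name}\n"
--         "\n"
--         f"{description}\n"
--         "\n"
--         "## Instructions\n"
--         "\n"
--         "Add your subagent instructions here..."
--     )
-- ===== Notes on version B (the rewrite author's own statement) =====
-- stated objective: simpler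
-- what changed: Instead of appending ~40 single lines to a list and '\n'-joining them, B returns one multi-line f-string template and splices in a body obtained by ''-joining per-environment multi-line text blocks looked up in a dict (unknown environments contribute the empty string).
import Mathlib
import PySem

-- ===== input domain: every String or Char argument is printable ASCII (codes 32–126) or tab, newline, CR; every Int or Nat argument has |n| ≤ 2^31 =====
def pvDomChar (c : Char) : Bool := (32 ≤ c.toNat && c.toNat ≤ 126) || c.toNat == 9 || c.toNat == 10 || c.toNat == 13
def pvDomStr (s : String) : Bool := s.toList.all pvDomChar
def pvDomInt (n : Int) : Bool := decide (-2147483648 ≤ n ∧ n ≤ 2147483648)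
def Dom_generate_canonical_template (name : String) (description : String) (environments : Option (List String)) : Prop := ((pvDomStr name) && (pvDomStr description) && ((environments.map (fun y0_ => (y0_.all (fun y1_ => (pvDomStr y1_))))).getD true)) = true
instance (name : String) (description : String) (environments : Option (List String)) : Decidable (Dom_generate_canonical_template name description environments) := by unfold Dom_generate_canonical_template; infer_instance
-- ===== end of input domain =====

-- B builds the result as one multi-line template string (f-string concatenation) with the body
-- spliced in from a dict of per-environment text blocks, instead of accumulating a list of lines; simpler, same cost.

-- ===== PORT A =====
-- literal transliteration: the loop with its if/elif chain becomes a foldl appending lines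
def generate_canonical_template (name : String) (description : String) (environments : Option (List String)) : String :=
  let envs := match environments with
    | none => ["claude", "opencode", "copilot"]
    | some e => e
  let lines := ["---"]
  let lines := lines ++ ["meta:"]
  let lines := lines ++ ["  name: " ++ name]
  let lines := lines ++ ["  description: " ++ description]
  let lines := lines ++ [""]
  let lines := lines ++ ["environments:"]
  let lines := envs.foldl (fun acc env =>
    if env == "claude" then
      acc ++ ["  claude:"] ++ ["    target: \".claude/agents/\""] ++ ["    model: sonnet"] ++ ["    permissionMode: default"]
    else if env == "opencode" then
      acc ++ ["  opencode:"] ++ ["    target: \".opencode/agent/\""] ++ ["    mode: subagent"] ++ ["    temperature: 0.1"]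
    else if env == "copilot" then
      acc ++ ["  copilot:"] ++ ["    target: \".github/agents/\""] ++ ["    infer: true"] ++ ["    tools:"] ++ ["      - read"] ++ ["      - edit"] ++ ["      - search"]
    else acc) lines
  let lines := lines ++ [""] ++ ["# Common configuration (can be overridden per-environment)"] ++ ["tools:"]
    ++ ["  - Read"] ++ ["  - Write"] ++ ["  - Edit"] ++ ["  - Bash"] ++ ["  - Grep"] ++ ["---"] ++ [""]
    ++ ["# " ++ name] ++ [""] ++ [description] ++ [""] ++ ["## Instructions"] ++ [""]
    ++ ["Add your subagent instructions here..."]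
  PySem.Str.join "\n" lines

-- ===== PORT B =====
-- the dict of per-environment text blocks (each block carries its leading newline)
def gctBlocks : PySem.Dict String String :=
  PySem.Dict.ofList
    [ ("claude", "\n  claude:\n    target: \".claude/agents/\"\n    model: sonnet\n    permissionMode: default")
    , ("opencode", "\n  opencode:\n    target: \".opencode/agent/\"\n    mode: subagent\n    temperature: 0.1")
    , ("copilot", "\n  copilot:\n    target: \".github/agents/\"\n    infer: true\n    tools:\n      - read\n      - edit\n      - search") ]

def generate_canonical_template_alt (name : String) (description : String) (environments : Option (List String)) : String :=
  let envs := match environments with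
    | none => ["claude", "opencode", "copilot"]
    | some e => e
  let body := PySem.Str.join "" (envs.map (fun env => PySem.Dict.getD gctBlocks env ""))
  "---\n" ++ "meta:\n" ++ ("  name: " ++ name ++ "\n") ++ ("  description: " ++ description ++ "\n")
    ++ "\n" ++ "environments:" ++ body ++ "\n"
    ++ "\n" ++ "# Common configuration (can be overridden per-environment)\n" ++ "tools:\n"
    ++ "  - Read\n" ++ "  - Write\n" ++ "  - Edit\n" ++ "  - Bash\n" ++ "  - Grep\n" ++ "---\n" ++ "\n"
    ++ ("# " ++ name ++ "\n") ++ "\n" ++ (description ++ "\n") ++ "\n"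
    ++ "## Instructions\n" ++ "\n" ++ "Add your subagent instructions here..."

-- ===== PRECONDITION & SPEC =====
def Spec_generate_canonical_template (name : String) (description : String) (environments : Option (List String)) (out : String) : Prop := out = generate_canonical_template_alt name description environments
instance (name : String) (description : String) (environments : Option (List String)) (out : String) : Decidable (Spec_generate_canonical_template name description environments out) := by unfold Spec_generate_canonical_template; infer_instance

-- ===== CLAIM (what is proved, stated in full; the proofs are below) =====
def Claim_equal_generate_canonical_template : Prop := ∀ (name : String) (description : String) (environments : Option (List String)), Dom_generate_canonical_template name description environments → Spec_generate_canonical_template name description environments (generate_canonical_template name description environments)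

-- ===== LEMMAS AND PROOFS =====

-- proof-only helper: the block of lines A's if/elif chain appends for one environment
def gctLines (env : String) : List String :=
  if env == "claude" then
    ["  claude:", "    target: \".claude/agents/\"", "    model: sonnet", "    permissionMode: default"]
  else if env == "opencode" then
    ["  opencode:", "    target: \".opencode/agent/\"", "    mode: subagent", "    temperature: 0.1"]
  else if env == "copilot" then
    ["  copilot:", "    target: \".github/agents/\"", "    infer: true", "    tools:", "      - read", "      - edit", "      - search"]
  else []

theorem gct_items : gctBlocks = PySem.Dict.mk
    [ ("claude", "\n  claude:\n    target: \".claude/agents/\"\n    model: sonnet\n    permissionMode: default")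
    , ("opencode", "\n  opencode:\n    target: \".opencode/agent/\"\n    mode: subagent\n    temperature: 0.1")
    , ("copilot", "\n  copilot:\n    target: \".github/agents/\"\n    infer: true\n    tools:\n      - read\n      - edit\n      - search") ] := by decide

-- intercalate with a nonempty head: the tail contributes sep-prefixed chunks
theorem gct_inter_head (sep x : List Char) (l : List (List Char)) :
    List.intercalate sep (x :: l) = x ++ l.flatMap (fun s => sep ++ s) := by
  induction l generalizing x with
  | nil => simp [List.intercalate]
  | cons y l ih => simp [List.intercalate, List.intersperse] at ih ⊢; simp [ih]

-- A's loop body appends exactly this env's block of lines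
theorem gct_step_eq (acc : List String) (env : String) :
    (if env == "claude" then acc ++ ["  claude:"] ++ ["    target: \".claude/agents/\""] ++ ["    model: sonnet"] ++ ["    permissionMode: default"]
     else if env == "opencode" then acc ++ ["  opencode:"] ++ ["    target: \".opencode/agent/\""] ++ ["    mode: subagent"] ++ ["    temperature: 0.1"]
     else if env == "copilot" then acc ++ ["  copilot:"] ++ ["    target: \".github/agents/\""] ++ ["    infer: true"] ++ ["    tools:"] ++ ["      - read"] ++ ["      - edit"] ++ ["      - search"]
     else acc) = acc ++ gctLines env := by
  unfold gctLines
  by_cases h1 : env == "claude" <;> by_cases h2 : env == "opencode" <;>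
    by_cases h3 : env == "copilot" <;> simp [h1, h2, h3]

-- A's whole loop equals one flatMap over the environments
theorem gct_foldl_eq (envs : List String) (acc : List String) :
    envs.foldl (fun acc env =>
      if env == "claude" then acc ++ ["  claude:"] ++ ["    target: \".claude/agents/\""] ++ ["    model: sonnet"] ++ ["    permissionMode: default"]
      else if env == "opencode" then acc ++ ["  opencode:"] ++ ["    target: \".opencode/agent/\""] ++ ["    mode: subagent"] ++ ["    temperature: 0.1"]
      else if env == "copilot" then acc ++ ["  copilot:"] ++ ["    target: \".github/agents/\""] ++ ["    infer: true"] ++ ["    tools:"] ++ ["      - read"] ++ ["      - edit"] ++ ["      - search"]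
      else acc) acc
      = acc ++ envs.flatMap gctLines := by
  have h : (fun acc env =>
      if env == "claude" then acc ++ ["  claude:"] ++ ["    target: \".claude/agents/\""] ++ ["    model: sonnet"] ++ ["    permissionMode: default"]
      else if env == "opencode" then acc ++ ["  opencode:"] ++ ["    target: \".opencode/agent/\""] ++ ["    mode: subagent"] ++ ["    temperature: 0.1"]
      else if env == "copilot" then acc ++ ["  copilot:"] ++ ["    target: \".github/agents/\""] ++ ["    infer: true"] ++ ["    tools:"] ++ ["      - read"] ++ ["      - edit"] ++ ["      - search"]
      else acc)
      = (fun acc env => acc ++ gctLines env) := by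
    funext acc env; exact gct_step_eq acc env
  rw [h, PySem.List.foldl_append_eq_flatMap]

-- each environment's lines, '\n'-prefixed and flattened, give B's dict block
theorem gct_blk (env : String) :
    (gctLines env).flatMap (fun s => '\n' :: s.toList) = (PySem.Dict.getD gctBlocks env "").toList := by
  unfold gctLines
  by_cases h1 : env = "claude"
  · subst h1; decide
  · by_cases h2 : env = "opencode"
    · subst h2; decide
    · by_cases h3 : env = "copilot"
      · subst h3; decide
      · have e1 : ("claude" == env) = false := beq_eq_false_iff_ne.mpr (Ne.symm h1)
        have e2 : ("opencode" == env) = false := beq_eq_false_iff_ne.mpr (Ne.symm h2)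
        have e3 : ("copilot" == env) = false := beq_eq_false_iff_ne.mpr (Ne.symm h3)
        rw [gct_items]
        simp [PySem.Dict.getD_eq_get?_getD, PySem.Dict.get?,
              List.find?, e1, e2, e3, h1, h2, h3]

-- intercalating on the empty separator is flattening
theorem gct_inter_nil (m : List (List Char)) : List.intercalate [] m = m.flatten := by
  cases m with
  | nil => simp [List.intercalate]
  | cons x l => simp [gct_inter_head, List.flatMap_def]

-- the body of the template: A's flattened '\n'-prefixed lines = B's ""-joined dict blocks
theorem gct_body (envs : List String) :
    (List.map (fun x => List.map (fun s => '\n' :: s.toList) (gctLines x)) envs).flatten.flatten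
      = List.intercalate [] (List.map (fun x => (gctBlocks.getD x "").toList) envs) := by
  induction envs with
  | nil => simp [List.intercalate]
  | cons e l ih =>
    have hb : (List.map (fun s => '\n' :: s.toList) (gctLines e)).flatten
        = (gctBlocks.getD e "").toList := by
      have := gct_blk e
      simpa [List.flatMap_def] using this
    simp [gct_inter_head, gct_inter_nil, hb, ih, List.flatMap_def, Function.comp_def]

-- the core equality, for an explicit environment list
set_option maxRecDepth 8000 in
theorem gct_core (name description : String) (envs : List String) :
    generate_canonical_template name description (some envs)
      = generate_canonical_template_alt name description (some envs) := by
  apply String.toList_inj.mp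
  unfold generate_canonical_template generate_canonical_template_alt
  dsimp only
  rw [gct_foldl_eq]
  simp [PySem.Str.join, PySem.Chars.join, gct_inter_head, List.flatMap_def,
        Function.comp_def]
  exact gct_body envs

-- ===== VERDICT (by name: the statement is the Claim_ definition above) =====
theorem generate_canonical_template_spec : Claim_equal_generate_canonical_template := by
  intro name description environments _
  unfold Spec_generate_canonical_template
  cases environments with
  | none => exact gct_core name description ["claude", "opencode", "copilot"]
  | some e => exact gct_core name description e
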